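-- pv_equiv track=rewrite | github.com/TheActualSanny/sweeft_algorithms | algos.py | marbles
-- ===== SOURCE A (Python) =====
-- def marbles(weights: list, k: int) -> int:
--     '''
--         Essentially, we have to partition the given list into sublists, and the sum of the start and end indexes
--         of those sublists are what we need to compute the final result.
--         If we take a list: a, b, c, d, e, f
--
--         We can partition it like this ( This is one case, but the outcome is the same for all cases ):
--         a | b | c  d | e | f ... ( the line meaning the start of a new sublist ). The sum will be (a + a) + (b + c) + (d + e) + ...
--         This means that one we group the elemets, both sides of the partitions will end up together.
--         Meaning that to get all of the possible sums, we must iterate over the list and sum lst[i] and lst[i + 1]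
--
--         After we append all of the values to the sums list, we sort it, and considering that we have k bags, we iterate over it k - 1  times and
--         , to get the max, sum each ith element ( as it is sorted in an ascending order ) and to get the min, we sum (len - i - 2)th element.
--
--         Finally, we return max - min.
--
--     '''
--     sums = list()
--     length = len(weights)
--     min_sum = 0
--     max_sum = 0
--     for i in range(len(weights) - 1):
--         sums.append(weights[i] + weights[i + 1] + weights[0] + weights[-1])
--     sums.sort()
--     for i in range(k - 1):
--         min_sum += sums[i]
--         max_sum += sums[length - 2 - i]
--     return max_sum - min_sum
-- ===== SOURCE B (Python) =====
-- def _smallest_sum(xs, m):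
--     # sum of the m smallest elements of xs (three-way quickselect, average O(len(xs)))
--     if m <= 0:
--         return 0
--     if m >= len(xs):
--         return sum(xs)
--     p = xs[len(xs) // 2]
--     lo = [x for x in xs if x < p]
--     if m <= len(lo):
--         return _smallest_sum(lo, m)
--     eq = xs.count(p)
--     if m <= len(lo) + eq:
--         return sum(lo) + p * (m - len(lo))
--     hi = [x for x in xs if x > p]
--     return sum(lo) + p * eq + _smallest_sum(hi, m - len(lo) - eq)
--
--
-- def marbles(weights: list, k: int) -> int:
--     m = k - 1
--     pairs = [a + b for a, b in zip(weights, weights[1:])]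
--     if m <= 0:
--         return 0
--     hi = sum(pairs) - _smallest_sum(pairs, len(pairs) - m)
--     lo = _smallest_sum(pairs, m)
--     return hi - lo
-- ===== Notes on version B (the rewrite author's own statement) =====
-- stated objective: alternative
-- what changed: B replaces sort-then-scan-from-both-ends by a three-way quickselect: it builds the adjacent-pair sums (dropping the weights[0]+weights[-1] constant A adds to every pair, which cancels in max-min), and computes the sum of the k-1 smallest and k-1 largest pair sums by recursive pivot partitioning instead of sorting.
import Mathlib
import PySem

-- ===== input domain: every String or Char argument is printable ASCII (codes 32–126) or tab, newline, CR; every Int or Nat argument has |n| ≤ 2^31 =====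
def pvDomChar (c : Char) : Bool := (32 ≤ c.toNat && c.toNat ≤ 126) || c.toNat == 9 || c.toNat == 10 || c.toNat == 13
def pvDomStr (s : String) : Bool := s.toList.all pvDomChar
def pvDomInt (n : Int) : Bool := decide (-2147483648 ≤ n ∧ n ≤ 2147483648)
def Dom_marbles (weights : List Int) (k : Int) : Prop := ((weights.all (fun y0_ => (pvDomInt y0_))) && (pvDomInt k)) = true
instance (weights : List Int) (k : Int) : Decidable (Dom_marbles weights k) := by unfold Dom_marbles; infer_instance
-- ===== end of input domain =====

-- B computes the k-1 extreme adjacent-pair sums by three-way quickselect instead of A's full sort,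
-- dropping the constant weights[0]+weights[-1] that A adds to every pair sum (it cancels in max-min).


-- ===== PORT A =====
def marbles (weights : List Int) (k : Int) : Int :=
  let sums := (PySem.List.pyRange 0 ((weights.length : Int) - 1) 1).foldl
    (fun acc i => acc ++ [PySem.List.pyGetD weights i 0 + PySem.List.pyGetD weights (i + 1) 0
                          + PySem.List.pyGetD weights 0 0 + PySem.List.pyGetD weights (-1) 0]) []
  let length : Int := (weights.length : Int)
  let sums := PySem.List.sorted sums (fun x => x) false
  let p := (PySem.List.pyRange 0 (k - 1) 1).foldl
    (fun (acc : Int × Int) i =>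
      (acc.1 + PySem.List.pyGetD sums i 0, acc.2 + PySem.List.pyGetD sums (length - 2 - i) 0))
    (0, 0)
  p.2 - p.1

-- ===== PORT B =====
-- pivot xs[len(xs)//2] of Source B's _smallest_sum
def pivotOf (xs : List Int) : Int :=
  PySem.List.pyGetD xs (PySem.Int.floordiv (xs.length : Int) 2) 0

-- sum of the m smallest elements of xs (three-way quickselect), port of Source B's _smallest_sum.
-- The recursion is bounded by the structural fuel argument n, always called with xs.length ≤ n
-- (each recursive call is on a strictly shorter filter of xs, so the fuel never runs out);
-- Source B binds p/lo/hi to variables, here each is written out at its use sites.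
def smallestSumAux (n : Nat) (xs : List Int) (m : Int) : Int :=
  match n with
  | 0 => 0
  | n + 1 =>
    if m ≤ 0 then 0
    else if (xs.length : Int) ≤ m then xs.sum
    else
      if m ≤ ((xs.filter (fun x => x < pivotOf xs)).length : Int) then
        smallestSumAux n (xs.filter (fun x => x < pivotOf xs)) m
      else if m ≤ ((xs.filter (fun x => x < pivotOf xs)).length : Int) + (PySem.List.count xs (pivotOf xs) : Int) then
        (xs.filter (fun x => x < pivotOf xs)).sum
          + pivotOf xs * (m - ((xs.filter (fun x => x < pivotOf xs)).length : Int))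
      else
        (xs.filter (fun x => x < pivotOf xs)).sum + pivotOf xs * (PySem.List.count xs (pivotOf xs) : Int) +
          smallestSumAux n (xs.filter (fun x => pivotOf xs < x))
            (m - ((xs.filter (fun x => x < pivotOf xs)).length : Int) - (PySem.List.count xs (pivotOf xs) : Int))

def smallestSum (xs : List Int) (m : Int) : Int := smallestSumAux xs.length xs m

def marbles_alt (weights : List Int) (k : Int) : Int :=
  let m := k - 1
  let pairs := List.zipWith (· + ·) weights (PySem.List.slice weights (some 1) none)
  if m ≤ 0 then 0
  else
    let hi := pairs.sum - smallestSum pairs ((pairs.length : Int) - m)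
    let lo := smallestSum pairs m
    hi - lo

-- ===== PRECONDITION & SPEC =====
-- Pre_ excludes exactly the inputs on which A raises IndexError: k ≥ 2 bags with more than
-- len(weights) of them (the loop then reads sums[i] past the end of the k-1 pair-sum list).
def Pre_marbles (weights : List Int) (k : Int) : Prop := k ≤ (weights.length : Int) ∨ k ≤ 1
instance (weights : List Int) (k : Int) : Decidable (Pre_marbles weights k) := by
  unfold Pre_marbles; infer_instance

def pvWitness_marbles : List Int × Int := ([1, 3, 2, 4], 3)

def Spec_marbles (weights : List Int) (k : Int) (out : Int) : Prop := out = marbles_alt weights k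
instance (weights : List Int) (k : Int) (out : Int) : Decidable (Spec_marbles weights k out) := by
  unfold Spec_marbles; infer_instance

-- ===== CLAIM (what is proved, stated in full; the proofs are below) =====
def Claim_equal_marbles : Prop := ∀ (weights : List Int) (k : Int), Dom_marbles weights k → Pre_marbles weights k → Spec_marbles weights k (marbles weights k)

-- ===== LEMMAS AND PROOFS =====

theorem pvThreeWayPerm (p : Int) (xs : List Int) :
    ((xs.filter (fun x => x < p)) ++ ((xs.filter (fun x => x == p)) ++ (xs.filter (fun x => p < x)))).Perm xs := by
  induction xs with
  | nil => simp
  | cons a xs ih =>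
    rcases lt_trichotomy a p with h | h | h
    · have h1 : ¬ p < a := by omega
      have h2 : (a == p) = false := by simp; omega
      simp only [List.filter_cons, h, h1, h2, decide_true, decide_false, if_pos,
        List.cons_append]
      exact ih.cons a
    · subst h
      have h1 : ¬ a < a := lt_irrefl a
      simp only [List.filter_cons, h1, decide_false, BEq.rfl, if_pos,
        List.cons_append]
      exact List.perm_middle.trans (ih.cons a)
    · have h1 : ¬ a < p := by omega
      have h2 : (a == p) = false := by simp; omega
      simp only [List.filter_cons, h, h1, h2, decide_true, decide_false, if_pos]
      exact ((List.Perm.append_left _ (List.Perm.append_left _ (List.Perm.refl _))).trans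
        ((List.Perm.append_left _ List.perm_middle).trans
          (List.perm_middle.trans (ih.cons a))))

theorem pvSortedDecomp (xs : List Int) (p : Int) :
    PySem.List.sorted xs (fun x => x) false =
      PySem.List.sorted (xs.filter (fun x => x < p)) (fun x => x) false
        ++ (List.replicate (xs.count p) p
        ++ PySem.List.sorted (xs.filter (fun x => p < x)) (fun x => x) false) := by
  apply PySem.List.sorted_id_eq_of_perm_of_pairwise
  · refine List.Perm.trans ?_ (pvThreeWayPerm p xs)
    refine List.Perm.append (PySem.List.sorted_perm ..) (List.Perm.append ?_ (PySem.List.sorted_perm ..))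
    rw [List.filter_beq]
  · refine List.pairwise_append.2 ⟨PySem.List.sorted_pairwise .., List.pairwise_append.2
      ⟨List.pairwise_replicate.2 (Or.inr (le_refl p)), PySem.List.sorted_pairwise .., ?_⟩, ?_⟩
    · intro a ha b hb
      have ha' := List.eq_of_mem_replicate ha
      have hb' := (List.mem_filter.1 ((PySem.List.mem_sorted ..).1 hb)).2
      subst ha'
      simpa using le_of_lt (by simpa using hb')
    · intro a ha b hb
      have ha' := (List.mem_filter.1 ((PySem.List.mem_sorted ..).1 ha)).2
      rcases List.mem_append.1 hb with hb | hb
      · have hb' := List.eq_of_mem_replicate hb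
        subst hb'
        exact le_of_lt (by simpa using ha')
      · have hb' := (List.mem_filter.1 ((PySem.List.mem_sorted ..).1 hb)).2
        have : a < p := by simpa using ha'
        have : p < b := by simpa using hb'
        omega

theorem pvCount_eq (xs : List Int) (v : Int) : PySem.List.count xs v = xs.count v := by
  simp [PySem.List.count]

theorem pvPivotMem (xs : List Int) (h : xs ≠ []) : pivotOf xs ∈ xs := by
  have hl : 0 < xs.length := List.length_pos_iff.2 h
  have hfd : PySem.Int.floordiv (xs.length : Int) 2 = (xs.length : Int) / 2 :=
    PySem.Int.floordiv_eq_ediv_of_pos (by omega)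
  unfold pivotOf
  apply PySem.List.pyGetD_mem
  unfold PySem.Raise.InRange
  rw [hfd]
  constructor <;> omega

theorem pvSmallestSumAux_eq (n : Nat) : ∀ (xs : List Int) (m : Int), xs.length ≤ n →
    smallestSumAux n xs m = ((PySem.List.sorted xs (fun x => x) false).take m.toNat).sum := by
  induction n with
  | zero =>
    intro xs m hn
    have hx : xs = [] := List.eq_nil_of_length_eq_zero (by omega)
    subst hx
    have : PySem.List.sorted ([] : List Int) (fun x => x) false = [] :=
      (PySem.List.sorted_perm ..).eq_nil
    simp [smallestSumAux, this]
  | succ n ih =>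
    intro xs m hn
    rw [smallestSumAux]
    by_cases h0 : m ≤ 0
    · have : m.toNat = 0 := by omega
      simp [h0, this]
    by_cases h1 : (xs.length : Int) ≤ m
    · have hlen : ((PySem.List.sorted xs (fun x => x) false)).length ≤ m.toNat := by
        rw [PySem.List.length_sorted]; omega
      rw [if_neg h0, if_pos h1, List.take_of_length_le hlen,
        (PySem.List.sorted_perm xs (fun x => x) false).sum_eq]
    rw [if_neg h0, if_neg h1]
    have hne : xs ≠ [] := by
      intro hx; subst hx; simp at h1; omega
    have hmem : pivotOf xs ∈ xs := pvPivotMem xs hne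
    set p := pivotOf xs with hp
    set lo := xs.filter (fun x => x < p) with hlo
    set hi := xs.filter (fun x => p < x) with hhi
    have hlolt : lo.length < xs.length :=
      List.length_filter_lt_length_iff_exists.2 ⟨p, hmem, by simp⟩
    have hhilt : hi.length < xs.length :=
      List.length_filter_lt_length_iff_exists.2 ⟨p, hmem, by simp⟩
    have hdecomp := pvSortedDecomp xs p
    rw [← hlo, ← hhi] at hdecomp
    set L1 := PySem.List.sorted lo (fun x => x) false with hL1
    set L3 := PySem.List.sorted hi (fun x => x) false with hL3
    have hL1len : L1.length = lo.length := PySem.List.length_sorted ..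
    have hL1sum : L1.sum = lo.sum := (PySem.List.sorted_perm ..).sum_eq
    have hL3len : L3.length = hi.length := PySem.List.length_sorted ..
    set c := xs.count p with hc
    rw [pvCount_eq]
    rw [← hc]
    by_cases h2 : m ≤ (lo.length : Int)
    · rw [if_pos h2, hdecomp, List.take_append_of_le_length (by omega)]
      exact ih lo m (by omega)
    rw [if_neg h2]
    -- from here m.toNat = lo.length + r
    have hm0 : 0 < m := by omega
    by_cases h3 : m ≤ (lo.length : Int) + (c : Int)
    · rw [if_pos h3, hdecomp, List.take_append, List.take_of_length_le (by omega),
        List.take_append, List.take_replicate]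
      have hmin : min (m.toNat - L1.length) c = m.toNat - L1.length := by omega
      have h0' : m.toNat - L1.length - (List.replicate c p).length = 0 := by
        rw [List.length_replicate]; omega
      rw [hmin, h0', List.take_zero, List.append_nil, List.sum_append, List.sum_replicate,
        hL1sum, nsmul_eq_mul]
      have : ((m.toNat - L1.length : Nat) : Int) = m - (lo.length : Int) := by omega
      rw [this]
      ring
    · rw [if_neg h3, hdecomp, List.take_append, List.take_of_length_le (by omega),
        List.take_append, List.take_of_length_le (by rw [List.length_replicate]; omega),
        List.sum_append, List.sum_append, List.sum_replicate, hL1sum, nsmul_eq_mul,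
        ih hi _ (by omega)]
      have : (m - (lo.length : Int) - (c : Int)).toNat
          = m.toNat - L1.length - (List.replicate c p).length := by
        rw [List.length_replicate]; omega
      rw [this]
      ring

theorem pvRangeNil (k : Int) (h : k ≤ 0) : PySem.List.pyRange 0 k 1 = [] := by
  apply List.eq_nil_iff_forall_not_mem.2
  intro x hx
  have := PySem.List.mem_pyRange_one.1 hx
  omega

theorem pvSortedMapAdd (xs : List Int) (c : Int) :
    PySem.List.sorted (xs.map (fun x => x + c)) (fun x => x) false
      = (PySem.List.sorted xs (fun x => x) false).map (fun x => x + c) := by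
  apply PySem.List.sorted_id_eq_of_perm_of_pairwise
  · exact (PySem.List.sorted_perm ..).map _
  · have hp : (PySem.List.sorted xs (fun x => x) false).Pairwise (fun a b => a ≤ b) :=
      PySem.List.sorted_pairwise ..
    exact List.Pairwise.map _ (fun a b h => by omega) hp

theorem pvPairsMap (w : List Int) :
    (PySem.List.pyRange 0 ((w.length : Int) - 1) 1).map
        (fun i => PySem.List.pyGetD w i 0 + PySem.List.pyGetD w (i + 1) 0
                  + PySem.List.pyGetD w 0 0 + PySem.List.pyGetD w (-1) 0)
      = (List.zipWith (· + ·) w w.tail).map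
          (fun x => x + (PySem.List.pyGetD w 0 0 + PySem.List.pyGetD w (-1) 0)) := by
  rcases w with _ | ⟨a, t⟩
  · simp
  set w := a :: t with hw
  have hlen : ((w.length : Int) - 1) = ((t.length : Nat) : Int) := by simp [hw]
  rw [hlen, PySem.List.pyRange_zero_natCast]
  apply List.ext_getElem
  · simp [hw]
  · intro i hi1 hi2
    simp only [List.getElem_map, List.getElem_range, List.getElem_zipWith]
    have hi : i < t.length := by simpa using hi1
    have g1 : PySem.List.pyGetD w ((i : Nat) : Int) 0 = w[i] := by
      rw [PySem.List.pyGetD_natCast, List.getD_eq_getElem]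
    have g2 : PySem.List.pyGetD w (((i : Nat) : Int) + 1) 0 = w[i + 1] := by
      have : (((i : Nat) : Int) + 1) = (((i + 1 : Nat) : Nat) : Int) := by push_cast; ring
      rw [this, PySem.List.pyGetD_natCast, List.getD_eq_getElem]
    rw [g1, g2]
    have : w.tail = t := rfl
    have ht : w[i+1] = t[i] := by
      simp [hw]
    rw [ht]
    simp [hw]
    ring

theorem pvFoldA (s : List Int) : ∀ (m : Nat), m ≤ s.length →
    ((List.range m).map (fun k : Nat => (Nat.cast k : Int))).foldl
        (fun (acc : Int × Int) i =>
          (acc.1 + PySem.List.pyGetD s i 0,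
           acc.2 + PySem.List.pyGetD s (((s.length : Int) + 1) - 2 - i) 0)) (0, 0)
      = ((s.take m).sum, (s.drop (s.length - m)).sum) := by
  intro m
  induction m with
  | zero => simp
  | succ m ih =>
    intro hm
    rw [List.range_succ, List.map_append, List.foldl_append, ih (by omega)]
    simp only [List.map_cons, List.map_nil, List.foldl_cons, List.foldl_nil]
    have hms : m < s.length := by omega
    rw [Prod.mk.injEq]
    constructor
    · -- first component
      show (s.take m).sum + PySem.List.pyGetD s ((m : Nat) : Int) 0 = (s.take (m+1)).sum
      rw [PySem.List.pyGetD_natCast,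
        List.getD_eq_getElem _ _ hms, List.take_add_one, List.sum_append,
        List.getElem?_eq_getElem hms]
      simp
    · -- second component
      show (s.drop (s.length - m)).sum + PySem.List.pyGetD s (((s.length : Int) + 1) - 2 - ((m : Nat) : Int)) 0
          = (s.drop (s.length - (m+1))).sum
      have hidx : (((s.length : Int) + 1) - 2 - ((m : Nat) : Int)) = ((s.length - 1 - m : Nat) : Int) := by
        omega
      have hlt : s.length - 1 - m < s.length := by omega
      rw [hidx, PySem.List.pyGetD_natCast, List.getD_eq_getElem _ _ hlt]
      have h1 : s.length - (m+1) = s.length - 1 - m := by omega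
      have h2 : s.length - m = (s.length - 1 - m) + 1 := by omega
      rw [h1, h2, List.drop_eq_getElem_cons hlt]
      simp [add_comm]

theorem pvSmallestSum_eq (xs : List Int) (m : Int) :
    smallestSum xs m = ((PySem.List.sorted xs (fun x => x) false).take m.toNat).sum :=
  pvSmallestSumAux_eq xs.length xs m (le_refl _)

-- ===== VERDICT (by name: the statement is the Claim_ definition above) =====
theorem marbles_spec : Claim_equal_marbles := by
  intro w k _ hpre
  unfold Spec_marbles marbles marbles_alt
  simp only []
  by_cases hk : k - 1 ≤ 0
  · rw [pvRangeNil (k-1) (by omega), if_pos hk]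
    simp
  · rw [if_neg hk]
    have hk2 : 2 ≤ k := by omega
    have hkn : k ≤ (w.length : Int) := by
      rcases hpre with h | h
      · exact h
      · omega
    have hn2 : 2 ≤ w.length := by omega
    -- A's pair-sum list
    rw [PySem.List.foldl_append_singleton_eq_map, pvPairsMap, List.nil_append, pvSortedMapAdd]
    -- notation
    set c0 := PySem.List.pyGetD w 0 0 + PySem.List.pyGetD w (-1) 0 with hc0
    set P := List.zipWith (· + ·) w w.tail with hP
    set t := PySem.List.sorted P (fun x => x) false with ht
    have hPlen : P.length = w.length - 1 := by
      rw [hP, List.length_zipWith, List.length_tail]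
      omega
    have htlen : t.length = P.length := PySem.List.length_sorted ..
    have htsum : t.sum = P.sum := (PySem.List.sorted_perm ..).sum_eq
    set s := t.map (fun x => x + c0) with hs
    have hslen : s.length = w.length - 1 := by rw [hs, List.length_map, htlen, hPlen]
    -- A's accumulation loop
    set m' := (k - 1).toNat with hm'
    have hm1 : 1 ≤ m' := by omega
    have hms : m' ≤ s.length := by omega
    have e1 : k - 1 = ((m' : Nat) : Int) := by omega
    have e2 : (w.length : Int) = ((s.length : Int) + 1) := by omega
    rw [e1, PySem.List.pyRange_zero_natCast, e2, pvFoldA s m' hms]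
    -- B's two selections
    rw [PySem.List.slice_from_one, pvSmallestSum_eq, pvSmallestSum_eq, ← hP, ← ht]
    -- arithmetic
    show (s.drop (s.length - m')).sum - (s.take m').sum
        = P.sum - (t.take ((P.length : Int) - (m' : Int)).toNat).sum - (t.take ((m' : Int)).toNat).sum
    have hd : ((P.length : Int) - (m' : Int)).toNat = s.length - m' := by omega
    have he1 : ((m' : Int) : Int).toNat = m' := by omega
    rw [hd, he1]
    have hmapsum : ∀ (l : List Int), (l.map (fun x => x + c0)).sum = l.sum + (l.length : Int) * c0 := by
      intro l
      induction l with
      | nil => simp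
      | cons a l ih =>
        simp [ih]
        ring
    have hts : s.length = t.length := by rw [hs, List.length_map]
    have htake : (s.take m').sum = (t.take m').sum + (m' : Int) * c0 := by
      rw [hs, ← List.map_take, hmapsum, List.length_take]
      congr 2
      omega
    have hdrop : (s.drop (s.length - m')).sum = (t.drop (s.length - m')).sum + (m' : Int) * c0 := by
      rw [hs, ← List.map_drop, hmapsum, List.length_drop]
      congr 2
      simp only [List.length_map]
      omega
    have hsplit := t.sum_take_add_sum_drop (s.length - m')
    rw [htake, hdrop]
    linarith [hsplit, htsum]
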